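-- pv_equiv track=rewrite | github.com/ryan3780/Algorithm-python | e2.py | solution
-- ===== SOURCE A (Python) =====
-- def solution(S):
--     string_a = S.split('a')
--     string_b = S.split('b')
--     string_a = list(filter(None, string_a))
--     string_b = list(filter(None, string_b))
--
--     long_string = max(check_long(string_a),check_long(string_b))
--
--     string_ab = string_a + string_b
--     diff = 0
--
--     for i in string_ab:
--         if len(i) < long_string:
--             diff += long_string - len(i)
--
--
--     return diff
--
-- def check_long(A):
--     long = 0
--
--     for i in A:
--         if len(i) > long:
--             long = len(i)
--
--     return long
-- ===== SOURCE B (Python) =====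
-- def solution(S):
--     # One streaming pass over the characters; no split(), no intermediate lists.
--     # A maximal run of non-'a' characters is exactly a nonempty piece of S.split('a')
--     # (same for 'b'); each closed run updates longest/count/total, and the summed
--     # deficit equals longest*count - total.
--     def close(longest, count, total, run):
--         if run:
--             count += 1
--             total += run
--             if run > longest:
--                 longest = run
--         return longest, count, total
--
--     longest = count = total = 0
--     run_a = run_b = 0
--     for ch in S:
--         if ch == 'a':
--             longest, count, total = close(longest, count, total, run_a)
--             run_a = 0
--         else:
--             run_a += 1
--         if ch == 'b':
--             longest, count, total = close(longest, count, total, run_b)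
--             run_b = 0
--         else:
--             run_b += 1
--     longest, count, total = close(longest, count, total, run_a)
--     longest, count, total = close(longest, count, total, run_b)
--     return longest * count - total
-- ===== Notes on version B (the rewrite author's own statement) =====
-- stated objective: alternative
-- what changed: B never calls split and builds no segment lists: it makes a single character-level pass over S, maintaining current run lengths for the 'a'-split and the 'b'-split simultaneously and folding each closed run into running longest/count/total accumulators, returning longest*count - total at the end; A builds both split lists, filters them, finds the max in two helper passes and accumulates deficits in a third loop.
import Mathlib
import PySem

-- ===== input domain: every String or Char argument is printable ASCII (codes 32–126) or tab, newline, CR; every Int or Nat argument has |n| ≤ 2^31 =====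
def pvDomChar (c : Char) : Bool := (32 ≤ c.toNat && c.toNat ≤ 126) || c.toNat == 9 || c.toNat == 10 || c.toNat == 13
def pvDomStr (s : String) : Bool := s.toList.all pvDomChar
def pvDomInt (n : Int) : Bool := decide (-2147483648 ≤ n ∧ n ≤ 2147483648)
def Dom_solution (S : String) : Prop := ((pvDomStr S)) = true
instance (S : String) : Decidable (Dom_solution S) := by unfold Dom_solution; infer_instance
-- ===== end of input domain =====

-- B is a single character-level streaming pass (no split, no segment lists) that folds
-- each closed run of non-delimiter characters into longest/count/total accumulators
-- and returns longest*count - total (objective: alternative; same O(n) cost).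

-- ===== PORT A =====
def check_long (A : List String) : Int :=
  A.foldl (fun long i => if PySem.Str.len i > long then PySem.Str.len i else long) 0

def solution (S : String) : Int :=
  -- S.split('a') with a nonempty literal separator never raises: split? is some here, getD is exact
  let string_a := ((PySem.Str.split? S "a").getD []).filter (fun x => x != "")
  let string_b := ((PySem.Str.split? S "b").getD []).filter (fun x => x != "")
  let long_string := max (check_long string_a) (check_long string_b)
  let string_ab := string_a ++ string_b
  string_ab.foldl
    (fun diff i => if PySem.Str.len i < long_string then diff + (long_string - PySem.Str.len i) else diff) 0

-- ===== PORT B =====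
-- close(longest, count, total, run) from Source B
def pvClose (st : Int × Int × Int) (run : Int) : Int × Int × Int :=
  if run ≠ 0 then ((if run > st.1 then run else st.1), st.2.1 + 1, st.2.2 + run) else st

-- one loop iteration of Source B: the 'a' branch pair, then the 'b' branch pair
def pvStep (st : (Int × Int × Int) × Int × Int) (ch : Char) : (Int × Int × Int) × Int × Int :=
  let lnt := st.1
  let ra := st.2.1
  let rb := st.2.2
  let p := if ch = 'a' then (pvClose lnt ra, (0 : Int)) else (lnt, ra + 1)
  let q := if ch = 'b' then (pvClose p.1 rb, (0 : Int)) else (p.1, rb + 1)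
  (q.1, p.2, q.2)

def solution_alt (S : String) : Int :=
  let r := S.toList.foldl pvStep ((0, 0, 0), 0, 0)
  let lnt := pvClose (pvClose r.1 r.2.1) r.2.2
  lnt.1 * lnt.2.1 - lnt.2.2

-- ===== PRECONDITION & SPEC =====
def Spec_solution (S : String) (out : Int) : Prop := out = solution_alt S
instance (S : String) (out : Int) : Decidable (Spec_solution S out) := by unfold Spec_solution; infer_instance

-- ===== CLAIM (what is proved, stated in full; the proofs are below) =====
def Claim_equal_solution : Prop := ∀ (S : String), Dom_solution S → Spec_solution S (solution S)

-- ===== LEMMAS AND PROOFS =====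

-- ---- characterising A's split lists ----

def pvCons (p : List Char) : List (List Char) → List (List Char)
  | [] => [p]
  | s :: ss => (p ++ s) :: ss

def pvF0 (c : Char) : List Char → List (List Char)
  | [] => [[]]
  | x :: xs => if x = c then [] :: pvF0 c xs else pvCons [x] (pvF0 c xs)

theorem pvF0_ne_nil (c : Char) (l : List Char) : pvF0 c l ≠ [] := by
  cases l with
  | nil => simp [pvF0]
  | cons x xs =>
    simp only [pvF0]
    split
    · simp
    · cases h0 : pvF0 c xs <;> simp [pvCons]

theorem pv_go (c : Char) (l : List Char) : ∀ (fuel : Nat) (cur : List Char) (acc : List (List Char)),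
    l.length < fuel →
    PySem.Chars.splitOn.go [c] fuel l cur acc = acc.reverse ++ pvCons cur.reverse (pvF0 c l) := by
  induction l with
  | nil =>
    intro fuel cur acc h
    match fuel with
    | fuel + 1 => simp [PySem.Chars.splitOn.go, pvF0, pvCons]
  | cons x xs ih =>
    intro fuel cur acc h
    match fuel with
    | fuel + 1 =>
      simp only [PySem.Chars.splitOn.go]
      by_cases hx : x = c
      · subst hx
        have hpre : [x].isPrefixOf (x :: xs) = true := by simp [List.isPrefixOf]
        simp only [hpre, List.length_cons, if_true, List.length_nil, Nat.zero_add,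
          List.drop_succ_cons, List.drop_zero]
        rw [ih fuel [] (cur.reverse :: acc) (by simp at h; omega)]
        cases h0 : pvF0 x xs with
        | nil => exact absurd h0 (pvF0_ne_nil x xs)
        | cons s ss => simp [pvF0, pvCons, h0]
      · have hpre : [c].isPrefixOf (x :: xs) = false := by
          simp [List.isPrefixOf]; exact fun hcx => hx hcx.symm
        simp only [hpre]
        rw [ih fuel (x :: cur) acc (by simp at h; omega)]
        simp only [pvF0, if_neg hx]
        cases h0 : pvF0 c xs <;> simp [pvCons, h0]

theorem pv_splitOn_eq (c : Char) (l : List Char) :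
    PySem.Chars.splitOn l [c] = pvF0 c l := by
  unfold PySem.Chars.splitOn
  rw [pv_go c l (l.length + 1) [] [] (by omega)]
  cases h0 : pvF0 c l with
  | nil => exact absurd h0 (pvF0_ne_nil c l)
  | cons s ss => simp [pvCons]

-- segment lengths of the c-split, first segment extended by a pending run of length r
def pvLens (c : Char) : List Char → Int → List Int
  | [], r => [r]
  | x :: xs, r => if x = c then r :: pvLens c xs 0 else pvLens c xs (r + 1)

theorem pv_lens_eq (c : Char) (l : List Char) : ∀ (p : List Char),
    (pvCons p (pvF0 c l)).map (fun s => (s.length : Int)) = pvLens c l (p.length : Int) := by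
  induction l with
  | nil => intro p; simp [pvF0, pvCons, pvLens]
  | cons x xs ih =>
    intro p
    by_cases hx : x = c
    · subst hx
      simp only [pvF0, if_pos rfl, pvCons, pvLens]
      have h := ih []
      simp only [List.length_nil, Int.natCast_zero] at h
      rw [← h]
      cases h0 : pvF0 x xs with
      | nil => exact absurd h0 (pvF0_ne_nil x xs)
      | cons s ss => simp [pvCons]
    · simp only [pvF0, if_neg hx, pvLens, if_neg hx]
      have hcomp : pvCons p (pvCons [x] (pvF0 c xs)) = pvCons (p ++ [x]) (pvF0 c xs) := by
        cases h0 : pvF0 c xs with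
        | nil => exact absurd h0 (pvF0_ne_nil c xs)
        | cons s ss => simp [pvCons]
      rw [hcomp, ih (p ++ [x])]
      norm_num

theorem pv_lens_F0 (c : Char) (l : List Char) :
    (pvF0 c l).map (fun s => (s.length : Int)) = pvLens c l 0 := by
  have h := pv_lens_eq c l []
  simp only [List.length_nil, Int.natCast_zero] at h
  rw [← h]
  cases h0 : pvF0 c l with
  | nil => exact absurd h0 (pvF0_ne_nil c l)
  | cons s ss => simp [pvCons]

-- ---- the accumulator algebra of B's close ----

def pvStats (lens : List Int) : Int × Int × Int := lens.foldl pvClose (0, 0, 0)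

theorem pvLens_nonneg (c : Char) (l : List Char) : ∀ (r : Int), 0 ≤ r →
    ∀ x ∈ pvLens c l r, 0 ≤ x := by
  induction l with
  | nil => intro r hr x hx; simp [pvLens] at hx; omega
  | cons y ys ih =>
    intro r hr x hx
    simp only [pvLens] at hx
    split at hx
    · rcases List.mem_cons.1 hx with h | h
      · omega
      · exact ih 0 le_rfl x h
    · exact ih (r + 1) (by omega) x hx

theorem pvStats_fst_nonneg (lens : List Int) : 0 ≤ (pvStats lens).1 := by
  unfold pvStats
  suffices h : ∀ (st : Int × Int × Int), st.1 ≤ (lens.foldl pvClose st).1 by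
    exact le_trans le_rfl (h (0,0,0))
  induction lens with
  | nil => intro st; simp
  | cons x xs ih =>
    intro st
    obtain ⟨L, n, t⟩ := st
    simp only [List.foldl_cons]
    refine le_trans ?_ (ih (pvClose (L, n, t) x))
    simp only [pvClose]; split_ifs <;> simp <;> omega

theorem pv_foldl_close (lens : List Int) : ∀ (st : Int × Int × Int), 0 ≤ st.1 →
    lens.foldl pvClose st
      = (max st.1 (pvStats lens).1, st.2.1 + (pvStats lens).2.1, st.2.2 + (pvStats lens).2.2) := by
  induction lens with
  | nil => intro st h; obtain ⟨L, n, t⟩ := st; simp [pvStats, Prod.mk.injEq]; omega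
  | cons x xs ih =>
    intro st h
    obtain ⟨L, n, t⟩ := st
    have h1 : pvStats (x :: xs) = xs.foldl pvClose (pvClose (0,0,0) x) := by simp [pvStats]
    have h2 := ih (pvClose (0,0,0) x) (by simp only [pvClose]; split_ifs <;> simp <;> omega)
    have h3 := ih (pvClose (L, n, t) x) (by simp only [pvClose]; split_ifs <;> simp <;> omega)
    simp only [List.foldl_cons, h1, h2, h3]
    simp only [pvClose, Prod.mk.injEq]
    split_ifs <;> simp <;> omega

theorem pvClose_fst (st : Int × Int × Int) (r : Int) :
    (pvClose st r).1 = if r = 0 then st.1 else max st.1 r := by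
  simp only [pvClose]; split_ifs <;> simp_all <;> omega

theorem pvClose_snd1 (st : Int × Int × Int) (r : Int) :
    (pvClose st r).2.1 = if r = 0 then st.2.1 else st.2.1 + 1 := by
  simp only [pvClose]; split_ifs <;> simp_all

theorem pvClose_snd2 (st : Int × Int × Int) (r : Int) :
    (pvClose st r).2.2 = if r = 0 then st.2.2 else st.2.2 + r := by
  simp only [pvClose]; split_ifs <;> simp_all

theorem pvClose_fst_nonneg (st : Int × Int × Int) (r : Int) (h : 0 ≤ st.1) :
    0 ≤ (pvClose st r).1 := by
  obtain ⟨L, n, t⟩ := st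
  simp only [pvClose]; split_ifs <;> simp <;> omega

-- ---- B's interleaved scan computes the two splits' statistics ----

theorem pv_scan (l : List Char) : ∀ (st : Int × Int × Int) (ra rb : Int),
    0 ≤ st.1 → 0 ≤ ra → 0 ≤ rb →
    pvClose (pvClose (l.foldl pvStep (st, ra, rb)).1 (l.foldl pvStep (st, ra, rb)).2.1)
      (l.foldl pvStep (st, ra, rb)).2.2
    = (max (max st.1 (pvStats (pvLens 'a' l ra)).1) (pvStats (pvLens 'b' l rb)).1,
       st.2.1 + (pvStats (pvLens 'a' l ra)).2.1 + (pvStats (pvLens 'b' l rb)).2.1,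
       st.2.2 + (pvStats (pvLens 'a' l ra)).2.2 + (pvStats (pvLens 'b' l rb)).2.2) := by
  induction l with
  | nil =>
    intro st ra rb hst hra hrb
    obtain ⟨L, n, t⟩ := st
    simp only [List.foldl_nil, pvLens, pvStats, List.foldl_cons]
    simp only [List.foldl_nil, pvClose, Prod.mk.injEq]
    split_ifs <;> simp_all <;> omega
  | cons x xs ih =>
    intro st ra rb hst hra hrb
    by_cases hxa : x = 'a'
    · subst hxa
      have hstep : pvStep (st, ra, rb) 'a' = (pvClose st ra, 0, rb + 1) := by
        simp [pvStep]
      rw [List.foldl_cons, hstep,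
          ih (pvClose st ra) 0 (rb + 1) (pvClose_fst_nonneg st ra hst) le_rfl (by omega)]
      have hA : pvLens 'a' ('a' :: xs) ra = ra :: pvLens 'a' xs 0 := by simp [pvLens]
      have hB : pvLens 'b' ('a' :: xs) rb = pvLens 'b' xs (rb + 1) := by simp [pvLens]
      rw [hA, hB]
      have hsplit : pvStats (ra :: pvLens 'a' xs 0)
          = (max (pvClose (0,0,0) ra).1 (pvStats (pvLens 'a' xs 0)).1,
             (pvClose (0,0,0) ra).2.1 + (pvStats (pvLens 'a' xs 0)).2.1,
             (pvClose (0,0,0) ra).2.2 + (pvStats (pvLens 'a' xs 0)).2.2) := by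
        show (pvLens 'a' xs 0).foldl pvClose (pvClose (0,0,0) ra) = _
        exact pv_foldl_close _ _ (pvClose_fst_nonneg (0,0,0) ra le_rfl)
      rw [hsplit]
      have h1 := pvStats_fst_nonneg (pvLens 'a' xs 0)
      have h2 := pvStats_fst_nonneg (pvLens 'b' xs (rb + 1))
      simp only [Prod.ext_iff, pvClose_fst, pvClose_snd1, pvClose_snd2]
      split_ifs <;> simp_all <;> omega
    · by_cases hxb : x = 'b'
      · subst hxb
        have hstep : pvStep (st, ra, rb) 'b' = (pvClose st rb, ra + 1, 0) := by
          simp [pvStep]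
        rw [List.foldl_cons, hstep,
            ih (pvClose st rb) (ra + 1) 0 (pvClose_fst_nonneg st rb hst) (by omega) le_rfl]
        have hA : pvLens 'a' ('b' :: xs) ra = pvLens 'a' xs (ra + 1) := by simp [pvLens]
        have hB : pvLens 'b' ('b' :: xs) rb = rb :: pvLens 'b' xs 0 := by simp [pvLens]
        rw [hA, hB]
        have hsplit : pvStats (rb :: pvLens 'b' xs 0)
            = (max (pvClose (0,0,0) rb).1 (pvStats (pvLens 'b' xs 0)).1,
               (pvClose (0,0,0) rb).2.1 + (pvStats (pvLens 'b' xs 0)).2.1,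
               (pvClose (0,0,0) rb).2.2 + (pvStats (pvLens 'b' xs 0)).2.2) := by
          show (pvLens 'b' xs 0).foldl pvClose (pvClose (0,0,0) rb) = _
          exact pv_foldl_close _ _ (pvClose_fst_nonneg (0,0,0) rb le_rfl)
        rw [hsplit]
        have h1 := pvStats_fst_nonneg (pvLens 'a' xs (ra + 1))
        have h2 := pvStats_fst_nonneg (pvLens 'b' xs 0)
        simp only [Prod.ext_iff, pvClose_fst, pvClose_snd1, pvClose_snd2]
        split_ifs <;> simp_all <;> omega
      · have hstep : pvStep (st, ra, rb) x = (st, ra + 1, rb + 1) := by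
          simp [pvStep, hxa, hxb]
        rw [List.foldl_cons, hstep, ih st (ra + 1) (rb + 1) hst (by omega) (by omega)]
        have hA : pvLens 'a' (x :: xs) ra = pvLens 'a' xs (ra + 1) := by simp [pvLens, hxa]
        have hB : pvLens 'b' (x :: xs) rb = pvLens 'b' xs (rb + 1) := by simp [pvLens, hxb]
        rw [hA, hB]

-- ---- pvStats in terms of the nonzero lengths ----

theorem pv_foldl_max_max (l : List Int) :
    ∀ a b : Int, l.foldl max (max a b) = max a (l.foldl max b) := by
  induction l with
  | nil => intro a b; rfl
  | cons x t ih =>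
    intro a b
    simp only [List.foldl_cons]
    rw [max_assoc]
    exact ih a (max b x)

theorem pvStats_eq (lens : List Int) (h : ∀ x ∈ lens, 0 ≤ x) :
    pvStats lens = ((lens.filter (fun x => x ≠ 0)).foldl max 0,
      ((lens.filter (fun x => x ≠ 0)).length : Int),
      (lens.filter (fun x => x ≠ 0)).sum) := by
  induction lens with
  | nil => simp [pvStats]
  | cons x xs ih =>
    have hx0 : 0 ≤ x := h x (by simp)
    have hxs := ih (fun y hy => h y (by simp [hy]))
    have h1 : pvStats (x :: xs) = xs.foldl pvClose (pvClose (0,0,0) x) := by simp [pvStats]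
    rw [h1, pv_foldl_close _ _ (pvClose_fst_nonneg (0,0,0) x le_rfl), hxs]
    have hmax0 : 0 ≤ ((xs.filter (fun x => x ≠ 0)).map id).foldl max 0 := by
      simpa using (PySem.List.le_foldl_max ((xs.filter (fun x => x ≠ 0)).map id) 0).1
    simp only [List.map_id] at hmax0
    by_cases hx : x = 0
    · subst hx
      have hfil : ((0 : Int) :: xs).filter (fun x => x ≠ 0) = xs.filter (fun x => x ≠ 0) := by
        simp
      rw [hfil]
      simp only [pvClose_fst, pvClose_snd1, pvClose_snd2, if_pos rfl, ite_true,
        Prod.mk.injEq]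
      refine ⟨by omega, by omega, by omega⟩
    · have hfil : (x :: xs).filter (fun x => x ≠ 0) = x :: xs.filter (fun x => x ≠ 0) := by
        simp [hx]
      rw [hfil]
      simp only [pvClose_fst, pvClose_snd1, pvClose_snd2, if_neg hx, List.foldl_cons,
        List.length_cons, List.sum_cons]
      have hswap : (xs.filter (fun x => x ≠ 0)).foldl max (max 0 x)
          = max x ((xs.filter (fun x => x ≠ 0)).foldl max 0) := by
        rw [max_comm 0 x]
        exact pv_foldl_max_max _ x 0
      rw [hswap]
      simp only [Prod.mk.injEq]
      refine ⟨by omega, by push_cast; ring, by push_cast; ring⟩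

-- ---- A's side ----

theorem pv_check_long_eq (A : List String) :
    check_long A = (A.map PySem.Str.len).foldl max 0 := by
  unfold check_long
  rw [List.foldl_map]
  apply PySem.List.foldl_congr_mem
  intro acc x _
  rw [max_def]; split_ifs <;> omega

theorem pv_sum_map_sub (M : Int) (l : List String) :
    (l.map (fun i => M - PySem.Str.len i)).sum
      = M * (l.length : Int) - (l.map PySem.Str.len).sum := by
  induction l with
  | nil => simp
  | cons x t ih =>
    simp only [List.map_cons, List.sum_cons, List.length_cons, ih]
    push_cast
    ring

theorem pv_keyA (la lb : List String) :
    (la ++ lb).foldl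
      (fun diff i =>
        if PySem.Str.len i < max (check_long la) (check_long lb) then
          diff + (max (check_long la) (check_long lb) - PySem.Str.len i)
        else diff) 0
    = max (check_long la) (check_long lb) * (((la ++ lb).length : Int))
        - ((la ++ lb).map PySem.Str.len).sum := by
  have hbound : ∀ x ∈ la ++ lb, PySem.Str.len x ≤ max (check_long la) (check_long lb) := by
    intro x hx
    rcases List.mem_append.1 hx with h | h
    · refine le_trans ?_ (le_max_left _ _)
      rw [pv_check_long_eq]
      exact (PySem.List.le_foldl_max (la.map PySem.Str.len) 0).2 _ (List.mem_map_of_mem h)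
    · refine le_trans ?_ (le_max_right _ _)
      rw [pv_check_long_eq]
      exact (PySem.List.le_foldl_max (lb.map PySem.Str.len) 0).2 _ (List.mem_map_of_mem h)
  rw [PySem.List.foldl_congr_mem _ _
        (fun diff i => diff + (max (check_long la) (check_long lb) - PySem.Str.len i)) 0
        (by intro acc x hx; have := hbound x hx; dsimp only; split_ifs <;> omega)]
  rw [PySem.List.foldl_add, pv_sum_map_sub, zero_add]

-- ---- bridges between A's string lists and the char-level lens lists ----

theorem pv_getD_split (S : String) (c : Char) (sep : String) (hsep : sep.toList = [c]) :
    ((PySem.Str.split? S sep).getD []) = (pvF0 c S.toList).map String.ofList := by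
  simp [PySem.Str.split?, PySem.Chars.split?, hsep, pv_splitOn_eq]

theorem pv_ofList_ne_empty (cs : List Char) :
    ((String.ofList cs) != "") = decide (cs ≠ []) := by
  have h : (String.ofList cs = "") ↔ cs = [] := by
    constructor
    · intro h; have := congrArg String.toList h; simpa using this
    · intro h; subst h; rfl
  by_cases hc : cs = []
  · subst hc; rfl
  · simp [bne, hc, beq_eq_false_iff_ne, h]

theorem pv_filter_len (c : Char) (l : List Char) :
    (((pvF0 c l).map String.ofList).filter (fun x => x != "")).map PySem.Str.len
      = (pvLens c l 0).filter (fun x => x ≠ 0) := by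
  rw [List.filter_map, List.map_map]
  have h1 : (PySem.Str.len ∘ String.ofList) = (fun cs : List Char => (cs.length : Int)) := by
    funext cs
    simp [PySem.Str.len_eq]
  have h2 : ((fun x => x != "") ∘ String.ofList) = (fun cs : List Char => decide (cs ≠ [])) := by
    funext cs
    exact pv_ofList_ne_empty cs
  rw [h1, h2, ← pv_lens_F0 c l, List.filter_map]
  congr 1
  apply List.filter_congr
  intro cs _
  simp [Function.comp]

-- ===== VERDICT (by name: the statement is the Claim_ definition above) =====
theorem solution_spec : Claim_equal_solution := by
  intro S _
  show solution S = solution_alt S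
  have hfa : ((PySem.Str.split? S "a").getD []) = (pvF0 'a' S.toList).map String.ofList :=
    pv_getD_split S 'a' "a" rfl
  have hfb : ((PySem.Str.split? S "b").getD []) = (pvF0 'b' S.toList).map String.ofList :=
    pv_getD_split S 'b' "b" rfl
  simp only [solution, solution_alt, hfa, hfb]
  rw [pv_keyA, pv_scan S.toList (0,0,0) 0 0 le_rfl le_rfl le_rfl]
  rw [pvStats_eq (pvLens 'a' S.toList 0) (pvLens_nonneg 'a' S.toList 0 le_rfl),
      pvStats_eq (pvLens 'b' S.toList 0) (pvLens_nonneg 'b' S.toList 0 le_rfl)]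
  set fa := ((pvF0 'a' S.toList).map String.ofList).filter (fun x => x != "") with hfa'
  set fb := ((pvF0 'b' S.toList).map String.ofList).filter (fun x => x != "") with hfb'
  set LA := (pvLens 'a' S.toList 0).filter (fun x => x ≠ 0) with hLA
  set LB := (pvLens 'b' S.toList 0).filter (fun x => x ≠ 0) with hLB
  have hlenA : fa.map PySem.Str.len = LA := pv_filter_len 'a' S.toList
  have hlenB : fb.map PySem.Str.len = LB := pv_filter_len 'b' S.toList
  have hCA : check_long fa = LA.foldl max 0 := by rw [pv_check_long_eq, hlenA]
  have hCB : check_long fb = LB.foldl max 0 := by rw [pv_check_long_eq, hlenB]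
  have hcA : fa.length = LA.length := by rw [← hlenA, List.length_map]
  have hcB : fb.length = LB.length := by rw [← hlenB, List.length_map]
  have hCA0 : 0 ≤ LA.foldl max 0 := (PySem.List.le_foldl_max LA 0).1
  have hmax : max (check_long fa) (check_long fb)
      = max (max 0 (LA.foldl max 0)) (LB.foldl max 0) := by
    rw [hCA, hCB, max_eq_right hCA0]
  rw [hmax]
  congr 1
  · congr 1
    simp [hcA, hcB]
  · simp only [List.map_append, List.sum_append, hlenA, hlenB]
    ring
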